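-- pv_equiv track=rewrite | github.com/thanhtruongtran/thesis | src/utils/list_dict.py | merging_list_of_dict
-- ===== SOURCE A (Python) =====
-- from collections import defaultdict
--
-- def merging_list_of_dict(dict_list):
--     temp_dict = defaultdict(list)
--     for current_dict in dict_list:
--         for key, value in current_dict.items():
--             temp_dict[key].append(value)
--
--     intersected_dict = {}
--     for key, sets_list in temp_dict.items():
--         if len(sets_list) > 1:
--             intersected_dict[key] = set.intersection(*sets_list)
--         else:
--             intersected_dict[key] = sets_list[0]
--
--     return intersected_dict
-- ===== SOURCE B (Python) =====
-- def merging_list_of_dict(dict_list):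
--     # Single pass: merge while scanning; intersect incrementally on repeated keys.
--     result = {}
--     for current_dict in dict_list:
--         for key, value in current_dict.items():
--             if key in result:
--                 result[key] = set.intersection(result[key], value)
--             else:
--                 result[key] = value
--     return result
-- ===== Notes on version B (the rewrite author's own statement) =====
-- stated objective: simpler
-- what changed: Replaces the two-phase defaultdict grouping (collect all values per key, then intersect each group afterwards) by a single pass that keeps one result dict and intersects incrementally on each repeated key, keeping the raw value for keys seen once.
import Mathlib
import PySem

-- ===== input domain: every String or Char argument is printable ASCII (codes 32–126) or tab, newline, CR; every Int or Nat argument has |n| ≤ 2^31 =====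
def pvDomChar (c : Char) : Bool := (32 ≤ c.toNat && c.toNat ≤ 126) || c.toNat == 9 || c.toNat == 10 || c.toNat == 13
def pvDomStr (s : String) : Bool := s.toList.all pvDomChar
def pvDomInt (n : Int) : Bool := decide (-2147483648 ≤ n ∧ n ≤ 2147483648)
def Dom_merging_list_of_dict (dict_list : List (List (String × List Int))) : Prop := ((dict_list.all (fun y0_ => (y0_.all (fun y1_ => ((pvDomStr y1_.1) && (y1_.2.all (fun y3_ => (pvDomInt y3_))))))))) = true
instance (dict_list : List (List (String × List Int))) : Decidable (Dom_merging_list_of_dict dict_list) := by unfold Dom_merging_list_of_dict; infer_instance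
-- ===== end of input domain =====

-- B replaces A's two-phase defaultdict grouping by a single pass that intersects incrementally
-- on repeated keys (objective: simpler; same asymptotic cost).


-- ===== PORT A =====
-- set.intersection(*sets_list): elements of the first set that lie in all the others (the values are
-- Python sets, a List Int of distinct elements compared as a finite set, so filtering is exact here).
def pyIntersectAll : List (List Int) → List Int
  | [] => []
  | s :: rest => rest.foldl (fun acc t => acc.filter (fun x => t.contains x)) s

-- loop body of A's grouping pass: temp_dict[key].append(value) on a defaultdict(list)
def pvAstep (td : PySem.Dict String (List (List Int))) (kv : String × List Int) :
    PySem.Dict String (List (List Int)) := td.modify kv.1 [] (fun l => l ++ [kv.2])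

-- Literal port of A: group every value per key with a defaultdict(list), then intersect each group
-- (a singleton group keeps its raw value, sets_list[0]).  Each inner association list denotes a
-- Python dict, so it is read through PySem.Dict.ofList before .items() is iterated.
def merging_list_of_dict (dict_list : List (List (String × List Int))) : List (String × List Int) :=
  let temp : PySem.Dict String (List (List Int)) :=
    dict_list.foldl (fun td cd => (PySem.Dict.ofList cd).items.foldl pvAstep td) PySem.Dict.empty
  let inter : PySem.Dict String (List Int) :=
    temp.items.foldl (fun rd p =>
      rd.insert p.1 (if p.2.length > 1 then pyIntersectAll p.2 else PySem.List.pyGetD p.2 0 []))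
      PySem.Dict.empty
  inter.items

-- ===== PORT B =====
-- loop body of B: a key already in result is intersected with the new value, a new key stores it raw
def pvBstep (rd : PySem.Dict String (List Int)) (kv : String × List Int) :
    PySem.Dict String (List Int) :=
  match rd.get? kv.1 with
  | some prev => rd.insert kv.1 (prev.filter (fun x => kv.2.contains x))
  | none => rd.insert kv.1 kv.2

-- Port of B (Source B): one pass over the entries keeping a single result dict.
def merging_list_of_dict_alt (dict_list : List (List (String × List Int))) : List (String × List Int) :=
  (dict_list.foldl (fun rd cd => (PySem.Dict.ofList cd).items.foldl pvBstep rd)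
    PySem.Dict.empty).items

-- ===== PRECONDITION & SPEC =====
def Spec_merging_list_of_dict (dict_list : List (List (String × List Int))) (out : List (String × List Int)) : Prop := out = merging_list_of_dict_alt dict_list
instance (dict_list : List (List (String × List Int))) (out : List (String × List Int)) : Decidable (Spec_merging_list_of_dict dict_list out) := by unfold Spec_merging_list_of_dict; infer_instance

-- ===== CLAIM (what is proved, stated in full; the proofs are below) =====
def Claim_equal_merging_list_of_dict : Prop := ∀ (dict_list : List (List (String × List Int))), Dom_merging_list_of_dict dict_list → Spec_merging_list_of_dict dict_list (merging_list_of_dict dict_list)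

-- ===== LEMMAS AND PROOFS =====
-- B's running dict is always A's grouping dict with every group collapsed by pyIntersectAll:
def pvProj (p : String × List (List Int)) : String × List Int := (p.1, pyIntersectAll p.2)

lemma get?_mk_map (l : List (String × List (List Int))) (k : String) :
    (PySem.Dict.mk (l.map pvProj)).get? k = ((PySem.Dict.mk l).get? k).map pyIntersectAll := by
  induction l with
  | nil => simp [PySem.Dict.get?]
  | cons p rest ih =>
    obtain ⟨pk, pv⟩ := p
    cases hb : (pk == k) <;> simp [pvProj, PySem.Dict.get?_mk_cons, hb, ih]

lemma contains_mk_map (l : List (String × List (List Int))) (k : String) :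
    (PySem.Dict.mk (l.map pvProj)).contains k = (PySem.Dict.mk l).contains k := by
  rw [PySem.Dict.contains_eq_isSome_get?, PySem.Dict.contains_eq_isSome_get?, get?_mk_map]
  cases (PySem.Dict.mk l).get? k <;> rfl

lemma pyIntersectAll_append (sl : List (List Int)) (v : List Int) (h : sl ≠ []) :
    pyIntersectAll (sl ++ [v]) = (pyIntersectAll sl).filter (fun x => v.contains x) := by
  cases sl with
  | nil => exact absurd rfl h
  | cons s rest => simp [pyIntersectAll, List.foldl_append]

lemma pvStep_eq (l : List (String × List (List Int))) (kv : String × List Int)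
    (h : ∀ p ∈ l, p.2 ≠ []) :
    pvBstep (PySem.Dict.mk (l.map pvProj)) kv = PySem.Dict.mk (((pvAstep (PySem.Dict.mk l) kv).items).map pvProj)
      ∧ ∀ p ∈ (pvAstep (PySem.Dict.mk l) kv).items, p.2 ≠ [] := by
  obtain ⟨k, v⟩ := kv
  have hmod : pvAstep (PySem.Dict.mk l) (k, v)
      = (PySem.Dict.mk l).insert k ((PySem.Dict.mk l).getD k [] ++ [v]) := by
    simp [pvAstep, PySem.Dict.modify]
  cases hc : (PySem.Dict.mk l).contains k with
  | true => -- key present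
    have ⟨sl, hsl⟩ : ∃ sl, (PySem.Dict.mk l).get? k = some sl := by
      have := PySem.Dict.contains_eq_isSome_get? (d := PySem.Dict.mk l) (k := k)
      rw [hc] at this; exact Option.isSome_iff_exists.mp this.symm
    have hslne : sl ≠ [] := h (k, sl) (PySem.Dict.mem_items_of_get?_eq_some _ hsl)
    have hgetD : (PySem.Dict.mk l).getD k [] = sl := by
      rw [PySem.Dict.getD_eq_get?_getD, hsl]; rfl
    have hA : (pvAstep (PySem.Dict.mk l) (k, v)).items
        = l.map (fun p => if p.1 == k then (k, sl ++ [v]) else p) := by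
      rw [hmod, hgetD, PySem.Dict.items_insert_of_contains _ _ hc]
    constructor
    · have hcB : (PySem.Dict.mk (l.map pvProj)).contains k = true := by
        rw [contains_mk_map]; exact hc
      have key : (l.map pvProj).map
            (fun p => if (p.1 == k) = true then (k, (pyIntersectAll sl).filter (fun x => v.contains x)) else p)
          = (l.map (fun p => if (p.1 == k) = true then (k, sl ++ [v]) else p)).map pvProj := by
        rw [List.map_map, List.map_map]
        apply List.map_congr_left
        intro p _
        by_cases hpk : (p.1 == k) = true
        · simp [Function.comp, pvProj, hpk, pyIntersectAll_append sl v hslne]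
        · simp [Function.comp, pvProj, hpk]
      rw [pvBstep]
      rw [get?_mk_map, hsl]
      simp only [Option.map_some]
      apply PySem.Dict.ext
      rw [PySem.Dict.items_insert_of_contains _ _ hcB, hA]
      exact key
    · rw [hA]
      intro p hp
      simp only [List.mem_map] at hp
      obtain ⟨q, hq, rfl⟩ := hp
      split_ifs with hh
      · simp
      · exact h q hq
  | false => -- key absent
    have hc' : (PySem.Dict.mk l).contains k = false := hc
    have hgetD : (PySem.Dict.mk l).getD k [] = [] := by
      rw [PySem.Dict.getD_eq_get?_getD, (PySem.Dict.get?_eq_none_iff_contains _ _).mpr hc']; rfl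
    have hA : (pvAstep (PySem.Dict.mk l) (k, v)).items = l ++ [(k, [v])] := by
      rw [hmod, hgetD, PySem.Dict.items_insert_of_not_contains _ _ hc']; rfl
    constructor
    · have hgB : (PySem.Dict.mk (l.map pvProj)).get? k = none := by
        rw [get?_mk_map, (PySem.Dict.get?_eq_none_iff_contains _ _).mpr hc']; rfl
      rw [pvBstep, hgB]
      apply PySem.Dict.ext
      have hcB : (PySem.Dict.mk (l.map pvProj)).contains k = false := by
        rw [contains_mk_map]; exact hc'
      rw [PySem.Dict.items_insert_of_not_contains _ _ hcB, hA]
      show l.map pvProj ++ [(k, v)] = (l ++ [(k, [v])]).map pvProj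
      simp [pvProj, pyIntersectAll]
    · rw [hA]; intro p hp
      rcases List.mem_append.mp hp with h1 | h1
      · exact h _ h1
      · simp_all

lemma pvFold_eq (es : List (String × List Int)) :
    ∀ l : List (String × List (List Int)), (∀ p ∈ l, p.2 ≠ []) →
    es.foldl pvBstep (PySem.Dict.mk (l.map pvProj))
      = PySem.Dict.mk (((es.foldl pvAstep (PySem.Dict.mk l)).items).map pvProj)
    ∧ ∀ p ∈ (es.foldl pvAstep (PySem.Dict.mk l)).items, p.2 ≠ [] := by
  induction es with
  | nil => intro l h; exact ⟨rfl, h⟩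
  | cons kv rest ih =>
    intro l h
    obtain ⟨h1, h2⟩ := pvStep_eq l kv h
    have hrec := ih ((pvAstep (PySem.Dict.mk l) kv).items) h2
    simp only [List.foldl_cons]
    rw [h1]
    exact hrec

lemma pvNestedFoldl {α β : Type} (g : α → List (String × List Int)) (L : List α)
    (f : β → (String × List Int) → β) (i : β) :
    L.foldl (fun acc cd => (g cd).foldl f acc) i = (L.flatMap g).foldl f i := by
  induction L generalizing i <;> simp_all [List.foldl_append]

lemma pvValue_eq (sl : List (List Int)) (h : sl ≠ []) :
    (if sl.length > 1 then pyIntersectAll sl else PySem.List.pyGetD sl 0 []) = pyIntersectAll sl := by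
  match sl with
  | [] => exact absurd rfl h
  | [s] => simp [pyIntersectAll, PySem.List.pyGetD_zero_cons]
  | s :: r :: rs => simp

-- ===== VERDICT (by name: the statement is the Claim_ definition above) =====
theorem merging_list_of_dict_spec : Claim_equal_merging_list_of_dict := by
  unfold Claim_equal_merging_list_of_dict Spec_merging_list_of_dict
  intro dict_list _
  unfold merging_list_of_dict merging_list_of_dict_alt
  show ((dict_list.foldl (fun td cd => (PySem.Dict.ofList cd).items.foldl pvAstep td)
        PySem.Dict.empty).items.foldl
      (fun rd p => rd.insert p.1 (if p.2.length > 1 then pyIntersectAll p.2 else PySem.List.pyGetD p.2 0 []))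
      PySem.Dict.empty).items
    = (dict_list.foldl (fun rd cd => (PySem.Dict.ofList cd).items.foldl pvBstep rd)
        PySem.Dict.empty).items
  rw [pvNestedFoldl (fun cd => (PySem.Dict.ofList cd).items) dict_list pvAstep PySem.Dict.empty,
      pvNestedFoldl (fun cd => (PySem.Dict.ofList cd).items) dict_list pvBstep PySem.Dict.empty]
  generalize (dict_list.flatMap (fun cd => (PySem.Dict.ofList cd).items)) = es
  obtain ⟨hB, hne⟩ := pvFold_eq es [] (by simp)
  have hB' : es.foldl pvBstep (PySem.Dict.empty (κ := String) (ν := List Int))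
      = PySem.Dict.mk ((es.foldl pvAstep PySem.Dict.empty).items.map pvProj) := hB
  have hne' : ∀ p ∈ (es.foldl pvAstep
      (PySem.Dict.empty (κ := String) (ν := List (List Int)))).items, p.2 ≠ [] := hne
  have hnodup : ((es.foldl pvAstep PySem.Dict.empty).items.map (fun p => p.1)).Nodup :=
    PySem.Dict.nodup_keys_foldl_modify_key es (fun kv : String × List Int => kv.1) []
      (fun _ (kv : String × List Int) l => l ++ [kv.2]) PySem.Dict.empty
      (PySem.Dict.nodup_keys_empty (κ := String) (ν := List (List Int)))
  have hA : (((es.foldl pvAstep PySem.Dict.empty).items).foldl (fun rd p =>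
        rd.insert p.1 (if p.2.length > 1 then pyIntersectAll p.2 else PySem.List.pyGetD p.2 0 []))
        PySem.Dict.empty).items
      = (es.foldl pvAstep PySem.Dict.empty).items.map (fun p =>
          (p.1, if p.2.length > 1 then pyIntersectAll p.2 else PySem.List.pyGetD p.2 0 [])) := by
    rw [PySem.Dict.items_foldl_insert_fresh ((es.foldl pvAstep PySem.Dict.empty).items)
      (fun p => p.1) _ PySem.Dict.empty
      (fun a _ => PySem.Dict.contains_empty a.1) hnodup]
    rfl
  rw [hA, hB']
  show _ = ((es.foldl pvAstep PySem.Dict.empty).items).map pvProj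
  apply List.map_congr_left
  intro p hp
  rw [pvValue_eq p.2 (hne' p hp)]
  rfl
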